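-- pv_equiv track=rewrite | github.com/shimpali/PYTHON_BASIC | practice/1_python_part_1/task4.py | calculate_power_with_difference
-- ===== SOURCE A (Python) =====
-- from typing import List
--
-- def calculate_power_with_difference(ints: List[int]) -> List[int]:
--     diff = []
--     powers = []
--     for index, value in enumerate(ints):
--         power = pow(value, 2)
--         powers.append(power)
--         if len(powers) == len(ints):
--             for index, pow_value in enumerate(powers):
--                 if index == 0:
--                     diff = [pow_value]
--                 if index - 1 >= 0:
--                     diff.append(pow_value - (powers[index - 1] - ints[index - 1]))
--
--     return diff
-- ===== SOURCE B (Python) =====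
-- from typing import List
--
-- def calculate_power_with_difference(ints: List[int]) -> List[int]:
--     # Single pass carrying only the previous value; never materialises the squares list.
--     if not ints:
--         return []
--     result = [ints[0] ** 2]
--     prev = ints[0]
--     for v in ints[1:]:
--         result.append(v * v - prev * prev + prev)
--         prev = v
--     return result
-- ===== Notes on version B (the rewrite author's own statement) =====
-- stated objective: simpler
-- what changed: A builds the whole squares list and then rescans it by index in a second (nested, last-iteration-only) loop; B is one pass over the input carrying just the previous element, emitting the first element's square and then v*v - prev*prev + prev, with no intermediate list.
import Mathlib
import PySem

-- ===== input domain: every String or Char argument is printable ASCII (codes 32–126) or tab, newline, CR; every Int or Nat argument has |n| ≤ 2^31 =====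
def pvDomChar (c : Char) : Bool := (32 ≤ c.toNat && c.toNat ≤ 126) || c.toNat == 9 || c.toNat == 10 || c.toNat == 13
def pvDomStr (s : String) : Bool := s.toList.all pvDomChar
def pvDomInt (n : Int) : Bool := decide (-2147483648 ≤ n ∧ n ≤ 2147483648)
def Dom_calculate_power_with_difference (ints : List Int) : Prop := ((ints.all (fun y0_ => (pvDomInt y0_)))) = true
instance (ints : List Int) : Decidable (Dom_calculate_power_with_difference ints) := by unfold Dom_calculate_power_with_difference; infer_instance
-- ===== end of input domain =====

-- B replaces A's build-squares-list-then-indexed-rescan with a single pass that carries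
-- only the previous element; objective: simpler (same asymptotic cost).


-- ===== PORT A =====
-- inner loop body: 'if index == 0: diff = [pow_value]; if index - 1 >= 0: diff.append(...)'
-- powers[index-1] / ints[index-1] are always in range when taken (1 ≤ index < len), so the
-- total pyGetD with default 0 is exact here.
def pvStepInner (powers ints : List Int) (diff : List Int) (ipv : Int × Int) : List Int :=
  let diff := if ipv.1 = 0 then [ipv.2] else diff
  if ipv.1 - 1 ≥ 0 then
    diff ++ [ipv.2 - (PySem.List.pyGetD powers (ipv.1 - 1) 0 - PySem.List.pyGetD ints (ipv.1 - 1) 0)]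
  else diff

-- outer loop body: append value**2 to powers; when len(powers) == len(ints), rescan powers
def pvStepOuter (ints : List Int) (st : List Int × List Int) (iv : Int × Int) : List Int × List Int :=
  let power := iv.2 ^ 2
  let powers := st.2 ++ [power]
  let diff :=
    if powers.length = ints.length then
      (PySem.List.enumerate powers).foldl (pvStepInner powers ints) st.1
    else st.1
  (diff, powers)

def calculate_power_with_difference (ints : List Int) : List Int :=
  ((PySem.List.enumerate ints).foldl (pvStepOuter ints) ([], [])).1

-- ===== PORT B =====
def pvAltGo (prev : Int) : List Int → List Int
  | [] => []
  | v :: t => (v * v - prev * prev + prev) :: pvAltGo v t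

def calculate_power_with_difference_alt : List Int → List Int
  | [] => []
  | h :: t => h * h :: pvAltGo h t

-- ===== PRECONDITION & SPEC =====
def Spec_calculate_power_with_difference (ints : List Int) (out : List Int) : Prop := out = calculate_power_with_difference_alt ints
instance (ints : List Int) (out : List Int) : Decidable (Spec_calculate_power_with_difference ints out) := by unfold Spec_calculate_power_with_difference; infer_instance

-- ===== CLAIM (what is proved, stated in full; the proofs are below) =====
def Claim_equal_calculate_power_with_difference : Prop := ∀ (ints : List Int), Dom_calculate_power_with_difference ints → Spec_calculate_power_with_difference ints (calculate_power_with_difference ints)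

-- ===== LEMMAS AND PROOFS =====

-- the inner rescan, from index q.length + 1 on, appends exactly pvAltGo prev t
theorem pv_inner_aux (ints0 q t : List Int) (prev : Int) (acc : List Int)
    (hi : ints0 = q ++ prev :: t) :
    (PySem.List.enumerate (t.map (· ^ 2)) ((q.length : Int) + 1)).foldl
        (pvStepInner (ints0.map (· ^ 2)) ints0) acc
      = acc ++ pvAltGo prev t := by
  induction t generalizing q prev acc with
  | nil => simp [pvAltGo]
  | cons v t' ih =>
    have hq : ((q.length : Int) + 1) - 1 = (q.length : Int) := by ring
    have h1 : PySem.List.pyGetD ints0 (q.length : Int) 0 = prev := by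
      simp [hi, PySem.List.pyGetD_natCast, List.getD_eq_getElem?_getD]
    have h2 : PySem.List.pyGetD (ints0.map (· ^ 2)) (q.length : Int) 0 = prev ^ 2 := by
      simp [hi, PySem.List.pyGetD_natCast, List.getD_eq_getElem?_getD]
    have hne : ((q.length : Int) + 1) ≠ 0 := by positivity
    have hstep : pvStepInner (ints0.map (· ^ 2)) ints0 acc ((q.length : Int) + 1, v ^ 2)
        = acc ++ [v * v - prev * prev + prev] := by
      simp only [pvStepInner, hq]
      rw [if_neg hne, if_pos (by positivity), h1, h2]
      ring_nf
    have hi' : ints0 = (q ++ [prev]) ++ v :: t' := by simp [hi]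
    have := ih (q ++ [prev]) v (acc ++ [v * v - prev * prev + prev]) hi'
    simp only [List.map_cons, PySem.List.enumerate_cons, List.foldl_cons, hstep]
    simp only [List.length_append, List.length_cons, List.length_nil] at this
    push_cast at this ⊢
    rw [this]
    simp [pvAltGo]

-- the full rescan of powers = ints0.map (·^2) returns B's value, whatever diff it starts from
theorem pv_inner_top (h0 : Int) (t0 : List Int) (init : List Int) :
    (PySem.List.enumerate ((h0 :: t0).map (· ^ 2))).foldl
        (pvStepInner ((h0 :: t0).map (· ^ 2)) (h0 :: t0)) init
      = calculate_power_with_difference_alt (h0 :: t0) := by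
  have hstep : pvStepInner ((h0 :: t0).map (· ^ 2)) (h0 :: t0) init (0, h0 ^ 2)
      = [h0 ^ 2] := by
    simp [pvStepInner]
  have := pv_inner_aux (h0 :: t0) [] t0 h0 [h0 ^ 2] rfl
  simp only [List.length_nil, Nat.cast_zero, zero_add] at this
  simp only [List.map_cons] at hstep this ⊢
  rw [PySem.List.enumerate_cons, List.foldl_cons, hstep, zero_add, this]
  simp [calculate_power_with_difference_alt, pow_two]

-- outer loop: the condition fires only on the last element, where powers is the full squares list
theorem pv_outer_aux (ints0 : List Int) (rest : List Int) :
    ∀ (pre diff : List Int) (s : Int), rest ≠ [] → ints0 = pre ++ rest →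
    (PySem.List.enumerate rest s).foldl (pvStepOuter ints0) (diff, pre.map (· ^ 2))
      = (calculate_power_with_difference_alt ints0, ints0.map (· ^ 2)) := by
  induction rest with
  | nil => intro _ _ _ h; exact absurd rfl h
  | cons v rest' ih =>
    intro pre diff s _ hi
    have hpw : pre.map (· ^ 2) ++ [v ^ 2] = (pre ++ [v]).map (· ^ 2) := by simp
    cases rest' with
    | nil =>
      have hi' : ints0 = pre ++ [v] := hi
      have hfull : (pre ++ [v]).map (· ^ 2) = ints0.map (· ^ 2) := by rw [hi']
      have hlen : ((pre ++ [v]).map (· ^ 2)).length = ints0.length := by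
        rw [hfull]; simp
      obtain ⟨h0, t0, h03⟩ : ∃ h0 t0, ints0 = h0 :: t0 := by
        cases hx : ints0 with
        | nil => exact absurd (hx ▸ hi') (by simp)
        | cons a b => exact ⟨a, b, rfl⟩
      subst h03
      simp only [PySem.List.enumerate_cons, PySem.List.enumerate_nil, List.foldl_cons,
        List.foldl_nil, pvStepOuter, hpw, hfull, pv_inner_top]
      simp
    | cons v' rest'' =>
      have hlen : ((pre ++ [v]).map (· ^ 2)).length ≠ ints0.length := by
        rw [hi]; simp
      have hstep : pvStepOuter ints0 (diff, pre.map (· ^ 2)) (s, v)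
          = (diff, (pre ++ [v]).map (· ^ 2)) := by
        simp only [pvStepOuter, hpw]
        rw [if_neg hlen]
      rw [PySem.List.enumerate_cons, List.foldl_cons, hstep]
      exact ih (pre ++ [v]) diff (s + 1) (by simp) (by simpa using hi)

-- ===== VERDICT (by name: the statement is the Claim_ definition above) =====
theorem calculate_power_with_difference_spec : Claim_equal_calculate_power_with_difference := by
  intro ints _
  unfold Spec_calculate_power_with_difference calculate_power_with_difference
  cases ints with
  | nil => simp [calculate_power_with_difference_alt]
  | cons h t =>
    have := pv_outer_aux (h :: t) (h :: t) [] [] 0 (by simp) (by simp)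
    simp only [List.map_nil] at this
    rw [this]
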